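-- pv_equiv track=rewrite | github.com/ooqitech/ATP | atp-auto-core-open/atp/engine/api_chain.py | get_testcase_id_chain
-- ===== SOURCE A (Python) =====
-- import copy
--
-- def get_testcase_id_chain(testcase_id, table_data, chain_list=None):
--     """
--         根据testcase_id获取调用链[id]
--         return example:
--         [1,2,3,4]
--         """
--     if not chain_list:
--         chain_list = []
--
--     # 调用链最大长度保护
--     if len(chain_list) >= 100:
--         return chain_list
--
--     chain_list.insert(
--         0,
--         testcase_id
--     )
--     for table_testcase_id, setup_case_id_list in table_data.items():
--         if testcase_id == table_testcase_id:
--             setup_case_list = copy.copy(setup_case_id_list)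
--             setup_case_list.reverse()
--             if setup_case_list:
--                 for setup_case_id in setup_case_list:
--                     chain_list = get_testcase_id_chain(setup_case_id, table_data, chain_list=chain_list)
--
--     return chain_list
-- ===== SOURCE B (Python) =====
-- def get_testcase_id_chain(testcase_id, table_data, chain_list=None):
--     """Iterative (explicit-stack) preorder DFS equivalent of the recursive chain builder."""
--     if not chain_list:
--         chain_list = []
--     stack = [testcase_id]
--     while stack:
--         cur = stack.pop()
--         if len(chain_list) >= 100:
--             continue
--         chain_list.insert(0, cur)
--         # push setup ids in original order; LIFO pops give the reversed processing order
--         stack.extend(table_data.get(cur, []))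
--     return chain_list
-- ===== Notes on version B (the rewrite author's own statement) =====
-- stated objective: alternative
-- what changed: Replaces the self-recursive call-chain builder (recursion per setup id, copying and reversing each setup list) with a single iterative loop over an explicit stack that pops one id at a time and pushes its setup ids, with no recursion, no list copies and no reversals.
import Mathlib
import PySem

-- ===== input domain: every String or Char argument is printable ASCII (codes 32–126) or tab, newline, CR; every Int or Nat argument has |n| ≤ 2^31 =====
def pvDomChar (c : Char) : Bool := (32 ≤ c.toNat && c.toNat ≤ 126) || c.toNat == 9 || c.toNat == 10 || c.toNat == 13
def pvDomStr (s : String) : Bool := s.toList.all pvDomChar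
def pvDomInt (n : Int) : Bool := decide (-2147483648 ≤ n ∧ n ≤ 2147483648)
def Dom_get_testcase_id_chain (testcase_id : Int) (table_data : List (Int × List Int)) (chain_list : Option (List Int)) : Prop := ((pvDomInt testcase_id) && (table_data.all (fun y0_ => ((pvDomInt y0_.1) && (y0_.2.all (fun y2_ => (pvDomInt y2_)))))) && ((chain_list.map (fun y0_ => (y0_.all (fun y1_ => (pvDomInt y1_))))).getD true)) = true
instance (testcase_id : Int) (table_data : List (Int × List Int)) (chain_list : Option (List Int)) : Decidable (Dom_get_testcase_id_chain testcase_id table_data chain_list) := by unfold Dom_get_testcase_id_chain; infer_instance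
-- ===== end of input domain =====

-- B rewrites A's recursive call-chain builder as one explicit-stack iterative loop (alternative
-- decomposition, no recursion/copies/reversals); equivalence is about the RETURN value only
-- (both Pythons mutate a passed-in non-empty chain_list in place in the same way).

-- ===== PORT A =====
-- Recursion of A, fuel-indexed: every call that recurses first prepends an id and a call with
-- chain length >= 100 returns before recursing, so the recursion depth never exceeds 100 and
-- with fuel 101 the fuel-0 branch returns exactly what the Python returns there (the chain).
def goA (td : List (Int × List Int)) : Nat → Int → List Int → List Int
  | 0, _, chain => chain
  | f+1, id, chain =>
    if 100 ≤ chain.length then chain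
    else
      -- chain_list.insert(0, testcase_id), then the for-loop over table_data.items()
      td.foldl (fun ch kv =>
        if id = kv.1 then
          -- copy.copy + reverse, then the inner for-loop of recursive calls
          (kv.2.reverse).foldl (fun ch2 s => goA td f s ch2) ch
        else ch) (id :: chain)

def get_testcase_id_chain (testcase_id : Int) (table_data : List (Int × List Int)) (chain_list : Option (List Int)) : List Int :=
  -- `if not chain_list: chain_list = []`
  let c0 := match chain_list with | none => [] | some l => if l.isEmpty then [] else l
  goA table_data 101 testcase_id c0

-- ===== PORT B =====
-- table_data.get(cur, []) on the association list (first match, dict convention)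
def lookupSetup (td : List (Int × List Int)) (id : Int) : List Int :=
  ((td.find? (fun kv => kv.1 == id)).map (fun kv => kv.2)).getD []

def maxSetupLen (td : List (Int × List Int)) : Nat :=
  td.foldl (fun m kv => max m kv.2.length) 0

theorem maxSetupLen_aux (td : List (Int × List Int)) : ∀ m : Nat,
    m ≤ td.foldl (fun m kv => max m kv.2.length) m ∧
    ∀ kv ∈ td, kv.2.length ≤ td.foldl (fun m kv => max m kv.2.length) m := by
  induction td with
  | nil => intro m; exact ⟨le_rfl, by simp⟩
  | cons hd tl ih =>
    intro m
    refine ⟨?_, ?_⟩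
    · exact le_trans (le_max_left _ _) (ih (max m hd.2.length)).1
    · intro kv hkv
      rcases List.mem_cons.mp hkv with h | h
      · subst h
        exact le_trans (le_max_right _ _) (ih (max m kv.2.length)).1
      · exact (ih (max m hd.2.length)).2 kv h

theorem lookupSetup_len_le (td : List (Int × List Int)) (id : Int) :
    (lookupSetup td id).length ≤ maxSetupLen td := by
  unfold lookupSetup maxSetupLen
  cases hf : td.find? (fun kv => kv.1 == id) with
  | none => simp
  | some kv =>
    simp only [Option.map_some, Option.getD_some]
    exact (maxSetupLen_aux td 0).2 kv (List.mem_of_find?_eq_some hf)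

-- the while-stack loop of B: pop the head, skip at the cap, otherwise prepend to the chain and
-- push the popped id's setup list (stack.extend + pop-from-end = reversed at the head)
def loopB (td : List (Int × List Int)) : List Int → List Int → List Int
  | [], chain => chain
  | id :: rest, chain =>
    if 100 ≤ chain.length then loopB td rest chain
    else loopB td ((lookupSetup td id).reverse ++ rest) (id :: chain)
termination_by stack chain => (100 - chain.length) * (maxSetupLen td + 1) + stack.length
decreasing_by
  · simp only [List.length_cons]; omega
  · rename_i hguard
    have h := lookupSetup_len_le td id
    have e : 100 - chain.length = (100 - (chain.length + 1)) + 1 := by omega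
    simp only [List.length_append, List.length_reverse, List.length_cons]
    rw [e, Nat.add_mul, Nat.one_mul]
    omega

def get_testcase_id_chain_alt (testcase_id : Int) (table_data : List (Int × List Int)) (chain_list : Option (List Int)) : List Int :=
  let c0 := match chain_list with | none => [] | some l => if l.isEmpty then [] else l
  loopB table_data [testcase_id] c0

-- ===== PRECONDITION & SPEC =====
-- Pre_ excludes association lists with duplicate testcase-id keys: a Python dict cannot
-- contain duplicate keys, so such lists represent no input either Python program can receive
-- and first-match vs last-value lookup there is unspecified.
def Pre_get_testcase_id_chain (testcase_id : Int) (table_data : List (Int × List Int)) (chain_list : Option (List Int)) : Prop :=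
  (table_data.map Prod.fst).Nodup
instance (testcase_id : Int) (table_data : List (Int × List Int)) (chain_list : Option (List Int)) : Decidable (Pre_get_testcase_id_chain testcase_id table_data chain_list) := by unfold Pre_get_testcase_id_chain; infer_instance

def pvWitness_get_testcase_id_chain : Int × (List (Int × List Int)) × Option (List Int) :=
  (1, [(1, [2, 3]), (2, [4])], none)

def Spec_get_testcase_id_chain (testcase_id : Int) (table_data : List (Int × List Int)) (chain_list : Option (List Int)) (out : List Int) : Prop := out = get_testcase_id_chain_alt testcase_id table_data chain_list
instance (testcase_id : Int) (table_data : List (Int × List Int)) (chain_list : Option (List Int)) (out : List Int) : Decidable (Spec_get_testcase_id_chain testcase_id table_data chain_list out) := by unfold Spec_get_testcase_id_chain; infer_instance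

-- ===== CLAIM (what is proved, stated in full; the proofs are below) =====
def Claim_equal_get_testcase_id_chain : Prop := ∀ (testcase_id : Int) (table_data : List (Int × List Int)) (chain_list : Option (List Int)), Dom_get_testcase_id_chain testcase_id table_data chain_list → Pre_get_testcase_id_chain testcase_id table_data chain_list → Spec_get_testcase_id_chain testcase_id table_data chain_list (get_testcase_id_chain testcase_id table_data chain_list)

-- ===== LEMMAS AND PROOFS =====

-- A's sibling loop, fuel-indexed: process a list of ids left to right
def goSeq (td : List (Int × List Int)) (f : Nat) (l : List Int) (c : List Int) : List Int :=
  l.foldl (fun c s => goA td f s c) c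

theorem foldl_len_mono {α : Type} (F : List Int → α → List Int)
    (hF : ∀ c x, c.length ≤ (F c x).length) :
    ∀ (l : List α) (c : List Int), c.length ≤ (l.foldl F c).length := by
  intro l
  induction l with
  | nil => intro c; exact le_rfl
  | cons x xs ih => intro c; exact le_trans (hF c x) (ih (F c x))

theorem foldl_inv_congr {α : Type} (I : List Int → Prop) (F G : List Int → α → List Int)
    (hEq : ∀ c x, I c → F c x = G c x) (hI : ∀ c x, I c → I (F c x)) :
    ∀ (l : List α) (c : List Int), I c → l.foldl F c = l.foldl G c := by
  intro l
  induction l with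
  | nil => intro c _; rfl
  | cons x xs ih =>
    intro c hc
    simp only [List.foldl_cons]
    rw [← hEq c x hc]
    exact ih (F c x) (hI c x hc)

theorem goA_len (td : List (Int × List Int)) :
    ∀ (f : Nat) (id : Int) (c : List Int), c.length ≤ (goA td f id c).length := by
  intro f
  induction f with
  | zero => intro id c; exact le_rfl
  | succ g ih =>
    intro id c
    rw [goA]
    split
    · exact le_rfl
    · refine le_trans (by simp) (foldl_len_mono _ ?_ td (id :: c))
      intro ch kv
      split
      · exact foldl_len_mono _ (fun c2 s => ih s c2) kv.2.reverse ch
      · exact le_rfl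

theorem goSeq_len (td : List (Int × List Int)) (f : Nat) (l : List Int) (c : List Int) :
    c.length ≤ (goSeq td f l c).length :=
  foldl_len_mono _ (fun c2 s => goA_len td f s c2) l c

theorem items_fold_skip (td : List (Int × List Int)) (f : Nat) (id : Int) :
    ∀ (l : List (Int × List Int)), id ∉ l.map Prod.fst → ∀ c,
      l.foldl (fun ch kv => if id = kv.1 then (kv.2.reverse).foldl (fun ch2 s => goA td f s ch2) ch else ch) c = c := by
  intro l
  induction l with
  | nil => intro _ c; rfl
  | cons kv tl ih =>
    intro h c
    simp only [List.map_cons, List.mem_cons, not_or] at h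
    simp only [List.foldl_cons, if_neg h.1]
    exact ih h.2 c

theorem goA_cap (td : List (Int × List Int)) (f : Nat) (id : Int) (c : List Int)
    (h : 100 ≤ c.length) : goA td f id c = c := by
  cases f with
  | zero => rfl
  | succ g => rw [goA, if_pos h]

theorem items_fold_eq_lookup (td : List (Int × List Int)) (f : Nat) (id : Int) :
    ∀ (l : List (Int × List Int)), (l.map Prod.fst).Nodup → ∀ c,
      l.foldl (fun ch kv => if id = kv.1 then (kv.2.reverse).foldl (fun ch2 s => goA td f s ch2) ch else ch) c
        = (((((l.find? (fun kv => kv.1 == id))).map (fun kv => kv.2)).getD []).reverse).foldl (fun c s => goA td f s c) c := by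
  intro l
  induction l with
  | nil => intro _ c; rfl
  | cons kv tl ih =>
    intro hnd c
    simp only [List.map_cons, List.nodup_cons] at hnd
    by_cases h : id = kv.1
    · have hf : List.find? (fun kv => kv.1 == id) (kv :: tl) = some kv := by
        rw [List.find?_cons_of_pos]
        simp [← h]
      simp only [List.foldl_cons, if_pos h, hf, Option.map_some, Option.getD_some]
      exact items_fold_skip td f id tl (by rw [h]; exact hnd.1) _
    · have hf : List.find? (fun kv => kv.1 == id) (kv :: tl) = List.find? (fun kv => kv.1 == id) tl := by
        rw [List.find?_cons_of_neg]
        simp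
        exact fun e => h e.symm
      simp only [List.foldl_cons, if_neg h, hf]
      exact ih hnd.2 c

theorem goA_unfold (td : List (Int × List Int)) (hnd : (td.map Prod.fst).Nodup)
    (f : Nat) (id : Int) (c : List Int) (h : ¬ 100 ≤ c.length) :
    goA td (f+1) id c = goSeq td f (lookupSetup td id).reverse (id :: c) := by
  rw [goA, if_neg h]
  exact items_fold_eq_lookup td f id td hnd (id :: c)

theorem goA_fuel_irrel (td : List (Int × List Int)) (hnd : (td.map Prod.fst).Nodup) :
    ∀ (f1 f2 : Nat) (id : Int) (c : List Int),
      101 ≤ f1 + c.length → 101 ≤ f2 + c.length → goA td f1 id c = goA td f2 id c := by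
  intro f1
  induction f1 with
  | zero =>
    intro f2 id c h1 h2
    rw [goA_cap td 0 id c (by omega), goA_cap td f2 id c (by omega)]
  | succ g ih =>
    intro f2 id c h1 h2
    by_cases hc : 100 ≤ c.length
    · rw [goA_cap td _ id c hc, goA_cap td f2 id c hc]
    · obtain ⟨b, rfl⟩ : ∃ b, f2 = b + 1 := ⟨f2 - 1, by omega⟩
      rw [goA_unfold td hnd g id c hc, goA_unfold td hnd b id c hc]
      unfold goSeq
      refine foldl_inv_congr (fun c' => c.length + 1 ≤ c'.length) _ _ ?_ ?_ _ (id :: c) (by simp)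
      · intro c' x hI
        exact ih b x c' (by omega) (by omega)
      · intro c' x hI
        exact le_trans hI (goA_len td g x c')

theorem goSeq_fuel_irrel (td : List (Int × List Int)) (hnd : (td.map Prod.fst).Nodup)
    (f1 f2 : Nat) (l : List Int) (c : List Int)
    (h1 : 101 ≤ f1 + c.length) (h2 : 101 ≤ f2 + c.length) :
    goSeq td f1 l c = goSeq td f2 l c := by
  unfold goSeq
  refine foldl_inv_congr (fun c' => c.length ≤ c'.length) _ _ ?_ ?_ l c le_rfl
  · intro c' x hI
    exact goA_fuel_irrel td hnd f1 f2 x c' (by omega) (by omega)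
  · intro c' x hI
    exact le_trans hI (goA_len td f1 x c')

theorem goSeq_append (td : List (Int × List Int)) (f : Nat) (l1 l2 : List Int) (c : List Int) :
    goSeq td f (l1 ++ l2) c = goSeq td f l2 (goSeq td f l1 c) := by
  unfold goSeq
  rw [List.foldl_append]

theorem loopB_eq_goSeq (td : List (Int × List Int)) (hnd : (td.map Prod.fst).Nodup) :
    ∀ (stack : List Int) (c : List Int) (f : Nat),
      101 ≤ f + c.length → loopB td stack c = goSeq td f stack c := by
  intro stack c
  induction stack, c using loopB.induct td with
  | case1 c =>
    intro f _
    rw [loopB]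
    rfl
  | case2 id rest c hcap ih =>
    intro f hf
    rw [loopB, if_pos hcap, ih f hf]
    unfold goSeq
    simp only [List.foldl_cons, goA_cap td f id c hcap]
  | case3 id rest c hcap ih =>
    intro f hf
    obtain ⟨g, rfl⟩ : ∃ g, f = g + 1 := ⟨f - 1, by omega⟩
    rw [loopB, if_neg hcap, ih g (by simp only [List.length_cons]; omega)]
    have hrhs : goSeq td (g+1) (id :: rest) c
        = goSeq td (g+1) rest (goSeq td g (lookupSetup td id).reverse (id :: c)) := by
      unfold goSeq
      simp only [List.foldl_cons]
      rw [goA_unfold td hnd g id c hcap]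
      rfl
    rw [hrhs, goSeq_append]
    have hc' : (c.length + 1 : Nat) ≤ (goSeq td g (lookupSetup td id).reverse (id :: c)).length := by
      have h2 := goSeq_len td g (lookupSetup td id).reverse (id :: c)
      simp only [List.length_cons] at h2
      exact h2
    exact goSeq_fuel_irrel td hnd g (g+1) rest _ (by omega) (by omega)

-- ===== VERDICT (by name: the statement is the Claim_ definition above) =====
theorem get_testcase_id_chain_spec : Claim_equal_get_testcase_id_chain := by
  intro testcase_id table_data chain_list _ hpre
  unfold Spec_get_testcase_id_chain get_testcase_id_chain get_testcase_id_chain_alt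
  have key : ∀ c0 : List Int, goA table_data 101 testcase_id c0 = loopB table_data [testcase_id] c0 := by
    intro c0
    rw [loopB_eq_goSeq table_data hpre [testcase_id] c0 101 (by omega)]
    rfl
  cases chain_list with
  | none => exact key []
  | some l => exact key (if l.isEmpty then [] else l)
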